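-- pv_equiv track=rewrite | github.com/amandinejvl/Memoire | 1_Alignement/utils/Myers.py | create_sublists_with_margins
-- ===== SOURCE A (Python) =====
-- def create_sublists_with_margins(lst: list, n: int, margin: int) -> list:
--     """
--     Divise une liste en n parties égales (ou presque égales) avec une marge gauche et une marge droite.
--
--     Args:
--         lst (list): Liste à diviser.
--         n (int): Nombre de parties.
--         margin (int): Marge à ajouter à gauche et droite des parties.
--
--     Returns:
--         list: Liste des sous-listes avec marge.
--     """
--     if n <= 0:
--         raise ValueError("Le nombre de parties doit être supérieur à 0")
--
--     size = len(lst)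
--     quotient, reste = divmod(size, n)
--
--     result = []
--     start = 0
--
--     for i in range(n):
--         end = start + quotient + margin + (1 if i < reste else 0)
--         if start != 0:
--             start = start-margin
--         result.append(lst[start:end])
--         start = end-margin
--
--     return result
-- ===== SOURCE B (Python) =====
-- def create_sublists_with_margins(lst: list, n: int, margin: int) -> list:
--     """Divide-and-conquer on the number of parts instead of a linear loop
--     with a mutable running start: split the n parts into two halves at the
--     balanced cut point, recurse on each half, and slice only at the leaves."""
--     if n <= 0:
--         raise ValueError("Le nombre de parties doit être supérieur à 0")
--
--     def go(a, b, m):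
--         # produce the m balanced parts of lst[a:b] (with margins), m >= 1
--         if m == 1:
--             return [lst[(a - margin if a else 0): b + margin]]
--         k = m // 2
--         q, r = divmod(b - a, m)
--         cut = a + k * q + min(k, r)   # balanced cut: left half gets k parts
--         return go(a, cut, k) + go(cut, b, m - k)
--
--     return go(0, len(lst), n)
-- ===== Notes on version B (the rewrite author's own statement) =====
-- stated objective: alternative
-- what changed: Replaces A's linear loop with a mutable running start by a divide-and-conquer recursion on the number of parts: the n parts are split into two halves at the balanced cut point, each half is solved recursively on its global index interval, and slicing happens only at the leaves.
import Mathlib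
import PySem

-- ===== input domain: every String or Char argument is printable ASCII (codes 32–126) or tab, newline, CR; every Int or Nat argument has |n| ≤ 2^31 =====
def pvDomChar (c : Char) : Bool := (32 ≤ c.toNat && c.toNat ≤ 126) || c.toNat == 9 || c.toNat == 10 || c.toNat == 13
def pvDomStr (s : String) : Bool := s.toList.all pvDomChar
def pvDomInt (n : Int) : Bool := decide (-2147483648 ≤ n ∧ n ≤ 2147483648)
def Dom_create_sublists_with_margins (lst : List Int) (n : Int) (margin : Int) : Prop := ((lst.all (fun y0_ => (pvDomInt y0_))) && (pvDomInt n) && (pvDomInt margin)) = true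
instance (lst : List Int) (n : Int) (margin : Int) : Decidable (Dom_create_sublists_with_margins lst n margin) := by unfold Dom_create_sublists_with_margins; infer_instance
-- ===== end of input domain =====

-- B replaces A's linear loop with a mutable running start by a divide-and-conquer recursion
-- on the number of parts, slicing only at the leaves (objective: alternative, same cost; return value only).


-- ===== PORT A =====
-- literal transliteration of A; the n ≤ 0 branch is where the Python raises ValueError (excluded by Pre_)
def create_sublists_with_margins (lst : List Int) (n : Int) (margin : Int) : List (List Int) :=
  if n ≤ 0 then []
  else
    let size : Int := lst.length
    let quotient := PySem.Int.floordiv size n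
    let reste := PySem.Int.mod size n
    let fin := (PySem.List.pyRange 0 n 1).foldl
      (fun (st : List (List Int) × Int) (i : Int) =>
        let e := st.2 + quotient + margin + (if i < reste then 1 else 0)
        let s := if st.2 ≠ 0 then st.2 - margin else st.2
        (st.1 ++ [PySem.List.slice lst (some s) (some e)], e - margin))
      ([], 0)
    fin.1

-- ===== PORT B =====
-- B's recursive helper go(a, b, m): the m balanced parts of lst[a:b], by halving the parts
def pvGo (lst : List Int) (margin : Int) (a b : Int) (m : Nat) : List (List Int) :=
  if m ≤ 1 then
    if m = 1 then
      [PySem.List.slice lst (some (if a ≠ 0 then a - margin else 0)) (some (b + margin))]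
    else []   -- m = 0 is unreachable from the top-level call (n ≥ 1, halves stay ≥ 1)
  else
    let k := m / 2
    let q := PySem.Int.floordiv (b - a) (m : Int)
    let r := PySem.Int.mod (b - a) (m : Int)
    let cut := a + (k : Int) * q + min (k : Int) r
    pvGo lst margin a cut k ++ pvGo lst margin cut b (m - k)
termination_by m
decreasing_by all_goals omega

def create_sublists_with_margins_alt (lst : List Int) (n : Int) (margin : Int) : List (List Int) :=
  if n ≤ 0 then []
  else pvGo lst margin 0 (lst.length : Int) n.toNat

-- ===== PRECONDITION & SPEC =====
-- A raises ValueError for n ≤ 0; Pre_ excludes exactly those inputs.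
def Pre_create_sublists_with_margins (lst : List Int) (n : Int) (margin : Int) : Prop := 1 ≤ n
instance (lst : List Int) (n : Int) (margin : Int) : Decidable (Pre_create_sublists_with_margins lst n margin) := by unfold Pre_create_sublists_with_margins; infer_instance
def pvWitness_create_sublists_with_margins : List Int × Int × Int := ([1, 2, 3, 4, 5], 2, 1)

def Spec_create_sublists_with_margins (lst : List Int) (n : Int) (margin : Int) (out : List (List Int)) : Prop := out = create_sublists_with_margins_alt lst n margin
instance (lst : List Int) (n : Int) (margin : Int) (out : List (List Int)) : Decidable (Spec_create_sublists_with_margins lst n margin out) := by unfold Spec_create_sublists_with_margins; infer_instance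

-- ===== CLAIM (what is proved, stated in full; the proofs are below) =====
def Claim_equal_create_sublists_with_margins : Prop := ∀ (lst : List Int) (n : Int) (margin : Int), Dom_create_sublists_with_margins lst n margin → Pre_create_sublists_with_margins lst n margin → Spec_create_sublists_with_margins lst n margin (create_sublists_with_margins lst n margin)

-- ===== LEMMAS AND PROOFS =====

-- cut point i of a block starting at a with part size q and r extra elements
def pvCut (a q r i : Int) : Int := a + i * q + min i r

-- the i-th output slice, in terms of the global cut points
def pvSliceG (lst : List Int) (margin a q r i : Int) : List Int :=
  PySem.List.slice lst
    (some (if pvCut a q r i ≠ 0 then pvCut a q r i - margin else 0))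
    (some (pvCut a q r (i + 1) + margin))

lemma pvCut_zero (a q r : Int) (hr : 0 ≤ r) : pvCut a q r 0 = a := by
  simp [pvCut]; omega

lemma pvCut_succ (a q r k : Int) (hr : 0 ≤ r) :
    pvCut a q r (k + 1) = pvCut a q r k + q + (if k < r then 1 else 0) := by
  unfold pvCut
  rw [add_mul, one_mul]
  split_ifs with h <;> omega

-- A's loop invariant: after k iterations the state is (first k slices, cut point k)
lemma pvLoop (lst : List Int) (margin quotient reste : Int) (hr : 0 ≤ reste) :
    ∀ (k : Nat),
      ((PySem.List.pyRange 0 (k : Int) 1).foldl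
        (fun (st : List (List Int) × Int) (i : Int) =>
          (st.1 ++ [PySem.List.slice lst (some (if st.2 ≠ 0 then st.2 - margin else st.2))
             (some (st.2 + quotient + margin + if i < reste then 1 else 0))],
           (st.2 + quotient + margin + if i < reste then 1 else 0) - margin))
        ([], 0))
      = ((PySem.List.pyRange 0 (k : Int) 1).map (pvSliceG lst margin 0 quotient reste),
         pvCut 0 quotient reste (k : Int)) := by
  intro k
  induction k with
  | zero =>
    simp [PySem.List.pyRange_one_eq_nil (by omega : (0 : Int) ≤ 0), pvCut_zero _ _ _ hr]
  | succ k ih =>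
    have hcast : ((k + 1 : Nat) : Int) = (k : Int) + 1 := by push_cast; ring
    rw [hcast, PySem.List.pyRange_one_succ_right (by positivity), List.foldl_append, List.map_append, ih]
    simp only [List.foldl_cons, List.foldl_nil, List.map_cons, List.map_nil, Prod.mk.injEq]
    have hstart : (if pvCut 0 quotient reste (k : Int) ≠ 0 then pvCut 0 quotient reste (k : Int) - margin else pvCut 0 quotient reste (k : Int))
        = (if pvCut 0 quotient reste (k : Int) ≠ 0 then pvCut 0 quotient reste (k : Int) - margin else 0) := by
      split_ifs with h
      · rfl
      · omega
    have hend : pvCut 0 quotient reste (k : Int) + quotient + margin + (if (k : Int) < reste then 1 else 0)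
        = pvCut 0 quotient reste ((k : Int) + 1) + margin := by
      rw [pvCut_succ _ _ _ _ hr]; split_ifs <;> omega
    constructor
    · simp only [pvSliceG]
      rw [hstart, hend]
    · rw [pvCut_succ _ _ _ _ hr]; split_ifs <;> omega

-- B's recursion computes exactly the slices at the global cut points
lemma pvGo_eq (lst : List Int) (margin : Int) :
    ∀ (m : Nat) (a b q r : Int), 1 ≤ m → b - a = (m : Int) * q + r → 0 ≤ r → r < (m : Int) →
    pvGo lst margin a b m = (List.range m).map (fun (i : Nat) => pvSliceG lst margin a q r ((i : Nat) : Int)) := by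
  intro m
  induction m using Nat.strong_induction_on with
  | _ m ih =>
    intro a b q r hm hid hr0 hrm
    by_cases h1 : m ≤ 1
    · -- m = 1
      have hm1 : m = 1 := by omega
      subst hm1
      have hr : r = 0 := by push_cast at hrm; omega
      rw [pvGo]
      simp only [le_refl, if_true, List.range_one, List.map_cons, List.map_nil,
        Nat.cast_zero]
      have hb : b = pvCut a q r (0 + 1) := by
        simp [pvCut, hr]; push_cast at hid; omega
      have ha : pvCut a q r 0 = a := pvCut_zero _ _ _ hr0
      rw [pvSliceG, ha, ← hb]
    · -- m ≥ 2
      have hm2 : 2 ≤ m := by omega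
      rw [pvGo]
      simp only [h1, if_false]
      set k : Nat := m / 2 with hk
      have hk1 : 1 ≤ k := by omega
      have hkm : k < m := by omega
      -- the internally computed quotient and remainder are q and r
      have hmpos : (0 : Int) < (m : Int) := by exact_mod_cast (by omega : 0 < m)
      have hq : PySem.Int.floordiv (b - a) (m : Int) = q := by
        rw [PySem.Int.floordiv_eq_iff_of_pos hmpos]
        constructor <;> nlinarith
      have hr : PySem.Int.mod (b - a) (m : Int) = r := by
        have := PySem.Int.floordiv_mul_add_mod (b - a) (m : Int)
        rw [hq] at this; nlinarith
      simp only [hq, hr]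
      set cut : Int := a + (k : Int) * q + min (k : Int) r with hcut
      have hkInt : (0:Int) ≤ (k:Int) := by positivity
      -- left half: k parts of lst[a:cut]
      have hleft : pvGo lst margin a cut k = (List.range k).map (fun (i : Nat) => pvSliceG lst margin a q r ((i : Nat) : Int)) := by
        rcases lt_or_ge r (k : Int) with hc | hc
        · -- r < k : quotient q, remainder r
          have := ih k hkm a cut q r (by exact_mod_cast hk1)
            (by rw [hcut, min_eq_right (le_of_lt hc)]; ring) hr0 hc
          rw [this]
        · -- k ≤ r : quotient q+1, remainder 0
          have hrec := ih k hkm a cut (q + 1) 0 (by exact_mod_cast hk1)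
            (by rw [hcut, min_eq_left hc]; ring) le_rfl (by exact_mod_cast hk1)
          rw [hrec]
          apply List.map_congr_left
          intro i hi
          have hi' : (i : Int) ≤ (k : Int) := by
            have := List.mem_range.mp hi; exact_mod_cast Nat.le_of_lt this
          have heq : ∀ j : Int, 0 ≤ j → j ≤ (k : Int) → pvCut a (q + 1) 0 j = pvCut a q r j := by
            intro j hj0 hjk
            unfold pvCut
            rw [min_eq_right hj0, min_eq_left (le_trans hjk hc)]
            ring
          unfold pvSliceG
          rw [heq _ (by positivity) hi', heq _ (by positivity) (by exact_mod_cast Nat.succ_le_of_lt (List.mem_range.mp hi))]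
      -- right half: m - k parts of lst[cut:b]
      have hright : pvGo lst margin cut b (m - k) =
          (List.range (m - k)).map (fun (j : Nat) => pvSliceG lst margin a q r ((k : Int) + ((j : Nat) : Int))) := by
        have hmk : 1 ≤ m - k := by omega
        have hmkInt : ((m - k : Nat) : Int) = (m : Int) - (k : Int) := by omega
        rcases le_or_gt r (k : Int) with hc | hc
        · -- r ≤ k : quotient q, remainder 0
          have hrec := ih (m - k) (by omega) cut b q 0 hmk
            (by rw [hcut, hmkInt, min_eq_right hc]; nlinarith)
            le_rfl (by exact_mod_cast hmk)
          rw [hrec]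
          apply List.map_congr_left
          intro j _
          have heq : ∀ i : Int, 0 ≤ i → pvCut cut q 0 i = pvCut a q r ((k : Int) + i) := by
            intro i hi0
            unfold pvCut
            rw [min_eq_right hi0, hcut, min_eq_right hc,
              min_eq_right (by linarith : r ≤ (k : Int) + i)]
            ring
          unfold pvSliceG
          rw [heq _ (by positivity), heq _ (by positivity), add_assoc]
        · -- k < r : quotient q, remainder r - k
          have hrec := ih (m - k) (by omega) cut b q (r - (k : Int)) hmk
            (by rw [hcut, hmkInt, min_eq_left (le_of_lt hc)]; linear_combination hid) (by linarith)
            (by rw [hmkInt]; omega)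
          rw [hrec]
          apply List.map_congr_left
          intro j _
          have heq : ∀ i : Int, 0 ≤ i → pvCut cut q (r - (k : Int)) i = pvCut a q r ((k : Int) + i) := by
            intro i hi0
            unfold pvCut
            rw [hcut, min_eq_left (le_of_lt hc)]
            rcases le_total i (r - (k : Int)) with hir | hir
            · rw [min_eq_left hir, min_eq_left (by linarith : (k : Int) + i ≤ r)]; ring
            · rw [min_eq_right hir, min_eq_right (by linarith : r ≤ (k : Int) + i)]; ring
          unfold pvSliceG
          rw [heq _ (by positivity), heq _ (by positivity), add_assoc]
      rw [hleft, hright]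
      have hranges : List.range m = List.range k ++ (List.range (m - k)).map (fun x => k + x) := by
        conv_lhs => rw [show m = k + (m - k) from by omega]
        exact List.range_add
      rw [hranges, List.map_append, List.map_map]
      congr 1
  
-- ===== VERDICT (by name: the statement is the Claim_ definition above) =====
theorem create_sublists_with_margins_spec : Claim_equal_create_sublists_with_margins := by
  intro lst n margin _hdom hn
  unfold Pre_create_sublists_with_margins at hn
  unfold Spec_create_sublists_with_margins create_sublists_with_margins create_sublists_with_margins_alt
  have hn' : ¬ n ≤ 0 := by omega
  simp only [hn', if_false]
  have hnpos : (0 : Int) < n := by omega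
  have hr0 : 0 ≤ PySem.Int.mod (lst.length : Int) n := PySem.Int.mod_nonneg _ hnpos
  have hrn : PySem.Int.mod (lst.length : Int) n < n := PySem.Int.mod_lt _ hnpos
  have hk : n = ((n.toNat : Nat) : Int) := by omega
  rw [hk] at hr0 hrn ⊢
  rw [Int.toNat_natCast]
  rw [pvLoop lst margin _ _ hr0 n.toNat]
  rw [pvGo_eq lst margin n.toNat 0 (lst.length : Int)
    (PySem.Int.floordiv (lst.length : Int) ((n.toNat : Nat) : Int))
    (PySem.Int.mod (lst.length : Int) ((n.toNat : Nat) : Int))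
    (by omega)
    (by have := PySem.Int.floordiv_mul_add_mod (lst.length : Int) ((n.toNat : Nat) : Int); linear_combination -this)
    hr0 hrn]
  rw [PySem.List.pyRange_one, List.map_map]
  simp only [sub_zero, Int.toNat_natCast, zero_add]
  rfl
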